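-- pv_equiv track=rewrite | github.com/stevennoyce/AutexysHost | source/utilities/FET_Modeling.py | _indexOfValue
-- ===== SOURCE A (Python) =====
-- def _indexOfValue(y, value, guess=0):
-- 	guess = min(max(0, int(guess)), len(y)-1)
-- 	part1 = list(reversed(range(0,guess)))
-- 	part2 = list(range(guess, len(y) - 1))
-- 	woven = [item for pair in zip(part2, part1) for item in pair]
-- 	longer = part1 if(len(part1) >= len(part2)) else part2
-- 	indices = woven + longer[len(longer) - abs(len(part1)-len(part2)):]
--
-- 	index = -1
-- 	for i in indices:
-- 		if(((y[i] < value) and (y[i+1] >= value)) or ((y[i] > value) and (y[i+1] <= value))):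
-- 			distance1 = abs(y[i]-value)
-- 			distance2 = abs(y[i+1]-value)
-- 			index = i if(distance1 < distance2) else i+1
-- 			break
-- 	return index
-- ===== SOURCE B (Python) =====
-- def _indexOfValue(y, value, guess=0):
-- 	# Two directed scans (forward from guess, backward from guess-1) replace
-- 	# A's woven index list; the nearer-first winner is chosen by comparing offsets.
-- 	n = len(y)
-- 	guess = min(max(0, int(guess)), n - 1)
--
-- 	def crossing(i):
-- 		return ((y[i] < value) and (y[i+1] >= value)) or ((y[i] > value) and (y[i+1] <= value))
--
-- 	f = next((i for i in range(guess, n - 1) if crossing(i)), None)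
-- 	b = next((i for i in range(guess - 1, -1, -1) if crossing(i)), None)
-- 	if f is None and b is None:
-- 		return -1
-- 	if b is None or (f is not None and f - guess <= guess - 1 - b):
-- 		i = f
-- 	else:
-- 		i = b
-- 	return i if abs(y[i] - value) < abs(y[i+1] - value) else i + 1
-- ===== Notes on version B (the rewrite author's own statement) =====
-- stated objective: alternative
-- what changed: Replaces A's construction of a full woven index list (reversed range, zip, flatten, slice remainder) followed by a linear scan with two directed early-exit scans (forward from guess, backward from guess-1) whose first hits are compared by offset; no index list is built.
import Mathlib
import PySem

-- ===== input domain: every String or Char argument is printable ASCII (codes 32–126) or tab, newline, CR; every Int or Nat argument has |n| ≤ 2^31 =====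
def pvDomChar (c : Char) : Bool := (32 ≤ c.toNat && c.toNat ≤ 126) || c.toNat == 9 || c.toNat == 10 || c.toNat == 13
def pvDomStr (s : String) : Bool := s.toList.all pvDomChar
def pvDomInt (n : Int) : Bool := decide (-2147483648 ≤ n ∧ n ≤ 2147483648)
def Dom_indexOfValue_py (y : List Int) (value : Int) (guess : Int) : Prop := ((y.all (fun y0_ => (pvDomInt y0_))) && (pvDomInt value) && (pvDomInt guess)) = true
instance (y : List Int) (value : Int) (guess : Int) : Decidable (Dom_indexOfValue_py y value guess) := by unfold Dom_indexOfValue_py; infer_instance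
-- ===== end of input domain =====

-- B replaces A's woven index list (reversed range, zip, flatten, slice remainder, then scan)
-- by two directed early-exit scans whose first hits are compared by offset: an alternative
-- decomposition of the same search; same return value on every input (both are total).

-- shared by both ports: the crossing test  (y[i] < value ≤ y[i+1]) or (y[i] > value ≥ y[i+1]),
-- exactly the condition both Pythons test; indices reached are always in range, so pyGetD's
-- default 0 is never used
def pvCross (y : List Int) (value : Int) (i : Int) : Bool :=
  let a := PySem.List.pyGetD y i 0
  let b := PySem.List.pyGetD y (i+1) 0
  (decide (a < value) && decide (value ≤ b)) || (decide (value < a) && decide (b ≤ value))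

-- shared by both ports: the distance tie-break both Pythons apply at the found crossing
def pvPick (y : List Int) (value : Int) (i : Int) : Int :=
  if |PySem.List.pyGetD y i 0 - value| < |PySem.List.pyGetD y (i+1) 0 - value| then i else i + 1

-- ===== PORT A =====
def indexOfValue_py (y : List Int) (value : Int) (guess : Int) : Int :=
  let g : Int := min (max 0 guess) ((y.length : Int) - 1)
  let part1 := (PySem.List.pyRange 0 g 1).reverse
  let part2 := PySem.List.pyRange g ((y.length : Int) - 1) 1
  let woven := (part2.zip part1).flatMap (fun p => [p.1, p.2])
  let longer := if part1.length ≥ part2.length then part1 else part2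
  let indices := woven ++ PySem.List.slice longer
      (some ((longer.length : Int) - ((((part1.length : Int) - (part2.length : Int)).natAbs : Int)))) none
  match indices.find? (pvCross y value) with
  | some i => pvPick y value i
  | none => -1

-- ===== PORT B =====
def indexOfValue_py_alt (y : List Int) (value : Int) (guess : Int) : Int :=
  let n : Int := y.length
  let g : Int := min (max 0 guess) (n - 1)
  let f := (PySem.List.pyRange g (n-1) 1).find? (pvCross y value)
  let b := (PySem.List.pyRange (g-1) (-1) (-1)).find? (pvCross y value)
  match f, b with
  | none, none => -1
  | some i, none => pvPick y value i
  | none, some j => pvPick y value j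
  | some i, some j => if i - g ≤ g - 1 - j then pvPick y value i else pvPick y value j

-- ===== PRECONDITION & SPEC =====
def Spec_indexOfValue_py (y : List Int) (value : Int) (guess : Int) (out : Int) : Prop := out = indexOfValue_py_alt y value guess
instance (y : List Int) (value : Int) (guess : Int) (out : Int) : Decidable (Spec_indexOfValue_py y value guess out) := by unfold Spec_indexOfValue_py; infer_instance

-- ===== CLAIM (what is proved, stated in full; the proofs are below) =====
def Claim_equal_indexOfValue_py : Prop := ∀ (y : List Int) (value : Int) (guess : Int), Dom_indexOfValue_py y value guess → Spec_indexOfValue_py y value guess (indexOfValue_py y value guess)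

-- ===== LEMMAS AND PROOFS =====

-- A's "woven ++ leftover of the longer part" is the alternating interleave, forward list first
def itlv {α : Type} : List α → List α → List α
  | [], ys => ys
  | x :: xs, ys => x :: itlv ys xs
termination_by xs ys => xs.length + ys.length
decreasing_by simp; omega

lemma woven_drop_eq_itlv {α : Type} (xs : List α) : ∀ ys : List α,
    (xs.zip ys).flatMap (fun p => [p.1, p.2]) ++
      (if ys.length ≥ xs.length then ys else xs).drop (min xs.length ys.length) = itlv xs ys := by
  induction xs with
  | nil => intro ys; simp [itlv]
  | cons x xs ih =>
    intro ys
    cases ys with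
    | nil => simp [itlv.eq_def]
    | cons y ys =>
      simp only [List.zip_cons_cons, List.flatMap_cons, List.cons_append, List.length_cons,
        Nat.succ_min_succ, ge_iff_le, Nat.add_le_add_iff_right]
      rw [show (if xs.length ≤ ys.length then y :: ys else x :: xs).drop (min xs.length ys.length + 1)
          = (if xs.length ≤ ys.length then ys else xs).drop (min xs.length ys.length) by
          split_ifs <;> simp]
      have hu : itlv (x :: xs) (y :: ys) = x :: y :: itlv xs ys := by
        rw [itlv, itlv]
      rw [hu]
      have := ih ys
      simp only [ge_iff_le] at this
      simp [this]

lemma slice_longer_eq_drop {α : Type} (xs ys : List α) :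
    PySem.List.slice (if ys.length ≥ xs.length then ys else xs)
      (some (((if ys.length ≥ xs.length then ys else xs).length : Int) -
        ((((ys.length : Int) - (xs.length : Int)).natAbs : Int)))) none =
    (if ys.length ≥ xs.length then ys else xs).drop (min xs.length ys.length) := by
  rw [PySem.List.slice_from _ (by split_ifs <;> omega)]
  congr 1
  split_ifs <;> omega

lemma find?_itlv {α : Type} (P : α → Bool) (xs ys : List α) :
    (itlv xs ys).find? P =
      if xs.findIdx P ≤ ys.findIdx P
      then (xs.find? P).or (ys.find? P)
      else (ys.find? P).or (xs.find? P) := by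
  induction xs, ys using itlv.induct with
  | case1 ys => simp [itlv]
  | case2 x xs ys ih =>
    by_cases h : P x
    · simp [itlv, List.findIdx_cons, h]
    · simp only [itlv, List.find?_cons, List.findIdx_cons, h, cond_false, ih]
      by_cases hc : ys.findIdx P ≤ xs.findIdx P <;> split_ifs <;> first | rfl | omega

-- the first hit of P in an arithmetic progression (as a map over range) sits at its findIdx
lemma find?_map_range {f : Nat → Int} {P : Int → Bool} {m : Nat} {i : Int}
    (h : ((List.range m).map f).find? P = some i) :
    i = f (((List.range m).map f).findIdx P) := by
  have h2 := h
  rw [List.find?_eq_getElem?_findIdx, List.getElem?_map] at h2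
  rcases hg : (List.range m)[((List.range m).map f).findIdx P]? with _ | k
  · rw [hg] at h2; simp at h2
  · rw [hg] at h2
    have hm : ((List.range m).map f).findIdx P < m := by
      by_contra hlt
      rw [List.getElem?_eq_none (by simpa using hlt)] at hg
      cases hg
    have hk : k = ((List.range m).map f).findIdx P := by
      have h3 := List.getElem?_range hm
      rw [hg] at h3
      exact Option.some_inj.mp h3
    simp at h2
    rw [← h2, hk]

theorem indexOfValue_py_eq (y : List Int) (value : Int) (guess : Int) :
    indexOfValue_py y value guess = indexOfValue_py_alt y value guess := by
  unfold indexOfValue_py indexOfValue_py_alt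
  simp only []
  set g : Int := min (max 0 guess) ((y.length : Int) - 1) with hg
  set P := pvCross y value with hP
  -- B's countdown range is A's reversed part1
  have hrev : PySem.List.pyRange (g-1) (-1) (-1) = (PySem.List.pyRange 0 g 1).reverse := by
    rw [PySem.List.pyRange_neg_one_eq_reverse]; norm_num
  rw [hrev]
  -- both index sequences as maps over List.range
  have e2 : PySem.List.pyRange g ((y.length : Int) - 1) 1
      = (List.range (((y.length : Int) - 1 - g).toNat)).map (fun k : Nat => g + (k : Int)) :=
    PySem.List.pyRange_one g ((y.length : Int) - 1)
  have e1 : (PySem.List.pyRange 0 g 1).reverse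
      = (List.range g.toNat).map (fun k : Nat => g - 1 - (k : Int)) := by
    rw [← hrev, PySem.List.pyRange_neg_one]
    have hn : (g - 1 - (-1)).toNat = g.toNat := by omega
    rw [hn]
  rw [e1, e2, slice_longer_eq_drop, woven_drop_eq_itlv, find?_itlv]
  rcases h2 : ((List.range (((y.length : Int) - 1 - g).toNat)).map (fun k : Nat => g + (k : Int))).find? P with _ | i <;>
    rcases h1 : ((List.range g.toNat).map (fun k : Nat => g - 1 - (k : Int))).find? P with _ | j
  · split_ifs <;> simp
  · split_ifs <;> simp
  · split_ifs <;> simp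
  · -- both directions cross: offset comparison is findIdx comparison
    have hd2 := find?_map_range h2
    have hd1 := find?_map_range h1
    simp only [] at hd2 hd1
    by_cases hc : i - g ≤ g - 1 - j
    · rw [if_pos (by omega)]
      simp only [Option.some_or]
      rw [if_pos hc]
    · rw [if_neg (by omega)]
      simp only [Option.some_or]
      rw [if_neg hc]

-- ===== VERDICT (by name: the statement is the Claim_ definition above) =====
theorem indexOfValue_py_spec : Claim_equal_indexOfValue_py := by
  intro y value guess _
  unfold Spec_indexOfValue_py
  exact indexOfValue_py_eq y value guess
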